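-- pv_equiv track=rewrite | github.com/UiHyeon/algorithm_PS | Programmers_Lv3_02.py | solution
-- ===== SOURCE A (Python) =====
-- def solution(N, number):
--     dp_case = [[]]
--
--     for i in range(1,9):
--         case = []
--         case.append(int(str(N)*i))
--         for j in range(1, i):
--             for combi_i in dp_case[j]:
--                 for combi_j in dp_case[i-j]:
--                     case.append(combi_j + combi_i)
--                     case.append(combi_j * combi_i)
--                     if combi_j - combi_i >= 0 :
--                         case.append(combi_j - combi_i)
--                     if combi_j != 0 and combi_i != 0:
--                         case.append(combi_j // combi_i)
--
--         if number in case: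
--             return i
--         dp_case.append(list(set(case)))
--     return -1
-- ===== SOURCE B (Python) =====
-- def solution(N, number):
--     # Top-down: reachable(i) = set of values expressible with exactly i copies of digit N,
--     # computed by memoized recursion instead of a bottom-up table.
--     memo = {}
--
--     def reachable(i):
--         if i in memo:
--             return memo[i]
--         vals = {int(str(N) * i)}
--         for j in range(1, i):
--             left = reachable(i - j)
--             right = reachable(j)
--             for x in left:
--                 for y in right:
--                     vals.add(x + y)
--                     vals.add(x * y)
--                     if x - y >= 0:
--                         vals.add(x - y)
--                     if x != 0 and y != 0:
--                         vals.add(x // y)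
--         memo[i] = vals
--         return vals
--
--     for i in range(1, 9):
--         if number in reachable(i):
--             return i
--     return -1
-- ===== Notes on version B (the rewrite author's own statement) =====
-- stated objective: alternative
-- what changed: Replaced the bottom-up dp_case table with early return by a memoized recursive helper reachable(i) that returns the set of values expressible with exactly i copies of the digit; the main loop just probes reachable(1)..reachable(8). Pre_ excludes N < 0 with number != N, where both programs raise ValueError on int(str(N)*2).
import Mathlib
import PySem

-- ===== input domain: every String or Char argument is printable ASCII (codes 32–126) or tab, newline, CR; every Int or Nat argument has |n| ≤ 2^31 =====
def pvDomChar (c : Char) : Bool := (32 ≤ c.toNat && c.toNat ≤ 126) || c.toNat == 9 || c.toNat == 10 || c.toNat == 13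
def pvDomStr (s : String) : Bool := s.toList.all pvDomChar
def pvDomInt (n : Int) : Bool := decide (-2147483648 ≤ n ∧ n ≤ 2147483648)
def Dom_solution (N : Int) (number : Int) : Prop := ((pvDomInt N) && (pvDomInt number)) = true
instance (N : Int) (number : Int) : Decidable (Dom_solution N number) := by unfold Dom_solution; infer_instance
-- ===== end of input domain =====

-- B replaces A's bottom-up dp_case table by a memoized recursive helper reachable(i)
-- (set of values expressible with exactly i copies of the digit); same values, alternative decomposition.

-- ===== PORT A =====
-- body of A's innermost loop: the four conditional appends (Array.push = Python's O(1) list append)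
def bodyA (case : Array Int) (cj ci : Int) : Array Int :=
  let c1 := case.push (cj + ci)
  let c2 := c1.push (cj * ci)
  let c3 := if cj - ci ≥ 0 then c2.push (cj - ci) else c2
  if cj ≠ 0 ∧ ci ≠ 0 then c3.push (PySem.Int.floordiv cj ci) else c3

-- one iteration of A's outer loop: builds `case` for level i from dp_case.
-- int(str(N)*i): str(N)*i is String.join (replicate …); int() is ofStr?; for N < 0 and i ≥ 2
-- Python raises ValueError — Pre_solution excludes exactly the inputs that reach that point,
-- so the .getD 0 total form is never observed inside Pre_.
def caseA (N : Int) (dp : List (List Int)) (i : Int) : Array Int :=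
  let case : Array Int :=
    (#[] : Array Int).push ((PySem.Int.ofStr? (String.join (List.replicate i.toNat (PySem.Int.toStr N)))).getD 0)
  (PySem.List.pyRange 1 i 1).foldl (fun case j =>
    (PySem.List.pyGetD dp j []).foldl (fun case ci =>
      (PySem.List.pyGetD dp (i - j) []).foldl (fun case cj => bodyA case cj ci) case) case) case

-- a Python hash set under construction: the element list in insertion order (the PySem.Set value)
-- plus its constant-time membership index, exactly Python's hash set mechanism
def hadd (s : Array Int × Std.HashSet Int) (x : Int) : Array Int × Std.HashSet Int :=
  if s.2.contains x then s else (s.1.push x, s.2.insert x)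

-- list(set(l)) (element order: first occurrences; Python's hash order is not modelled — the
-- results of both programs only use membership, which is order-free); = PySem.Set.ofList l (proved below)
def hset (l : List Int) : List Int := (l.foldl hadd ((#[] : Array Int), (∅ : Std.HashSet Int))).1.toList

-- A's `for i in range(1,9)` with the early `return i`
def loopA (N : Int) (number : Int) : List Int → List (List Int) → Int
  | [], _ => -1
  | i :: rest, dp =>
    let case := caseA N dp i
    if case.contains number then i
    else loopA N number rest (dp ++ [hset case.toList])

def solution (N : Int) (number : Int) : Int :=
  loopA N number (PySem.List.pyRange 1 9 1) [[]]

-- ===== PORT B =====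
-- body of B's innermost loop: the four conditional set-adds (hash set as in Python)
def bodyB (vals : Array Int × Std.HashSet Int) (x y : Int) : Array Int × Std.HashSet Int :=
  let v1 := hadd vals (x + y)
  let v2 := hadd v1 (x * y)
  let v3 := if x - y ≥ 0 then hadd v2 (x - y) else v2
  if x ≠ 0 ∧ y ≠ 0 then hadd v3 (PySem.Int.floordiv x y) else v3

-- reachable(i) with its memo dict threaded through; the first Nat is fuel making the
-- recursion structural (callers pass fuel = i, always enough: level i only needs levels < i);
-- the foldl over range' 1 (i-1) is the `for j in range(1, i)` loop.
def reachB (N : Int) : Nat → Nat → PySem.Dict Int (PySem.Set Int) →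
    PySem.Set Int × PySem.Dict Int (PySem.Set Int)
  | 0, _, memo => (PySem.Set.empty, memo)  -- never reached: fuel ≥ i ≥ 1 at every call
  | fuel + 1, i, memo =>
    match PySem.Dict.get? memo (i : Int) with
    | some v => (v, memo)
    | none =>
      let vals : Array Int × Std.HashSet Int :=
        hadd ((#[] : Array Int), (∅ : Std.HashSet Int))
          ((PySem.Int.ofStr? (String.join (List.replicate i (PySem.Int.toStr N)))).getD 0)
      let r := (List.range' 1 (i - 1)).foldl
        (fun (acc : (Array Int × Std.HashSet Int) × PySem.Dict Int (PySem.Set Int)) j =>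
          let l := reachB N fuel (i - j) acc.2
          let rr := reachB N fuel j l.2
          (l.1.foldl (fun v x => rr.1.foldl (fun v y => bodyB v x y) v) acc.1, rr.2))
        (vals, memo)
      (r.1.1.toList, PySem.Dict.insert r.2 (i : Int) r.1.1.toList)

-- B's main loop `for i in range(1, 9)` probing reachable(i), memo threaded across iterations
def mainB (N : Int) (number : Int) : List Nat → PySem.Dict Int (PySem.Set Int) → Int
  | [], _ => -1
  | i :: rest, memo =>
    let r := reachB N i i memo
    if number ∈ r.1 then (i : Int) else mainB N number rest r.2

def solution_alt (N : Int) (number : Int) : Int :=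
  mainB N number [1, 2, 3, 4, 5, 6, 7, 8] PySem.Dict.empty

-- ===== PRECONDITION & SPEC =====
-- For N < 0 with number ≠ N, Python A (and Python B alike) raises ValueError at the second
-- level, because int(str(N)*2) parses e.g. '-1-1'; Pre_ admits everything else.
def Pre_solution (N : Int) (number : Int) : Prop := 0 ≤ N ∨ number = N
instance (N : Int) (number : Int) : Decidable (Pre_solution N number) := by
  unfold Pre_solution; infer_instance
def pvWitness_solution : Int × Int := (5, 12)

def Spec_solution (N : Int) (number : Int) (out : Int) : Prop := out = solution_alt N number
instance (N : Int) (number : Int) (out : Int) : Decidable (Spec_solution N number out) := by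
  unfold Spec_solution; infer_instance

-- ===== CLAIM (what is proved, stated in full; the proofs are below) =====
def Claim_equal_solution : Prop := ∀ (N : Int) (number : Int),
  Dom_solution N number → Pre_solution N number → Spec_solution N number (solution N number)

-- ===== LEMMAS AND PROOFS =====

-- the repdigit value int(str(N)*i) in its total form
def repP (N : Int) (i : Nat) : Int :=
  (PySem.Int.ofStr? (String.join (List.replicate i (PySem.Int.toStr N)))).getD 0

-- the list of values both programs derive from one operand pair (cj from the larger split, ci from the smaller)
def ops (cj ci : Int) : List Int :=
  [cj + ci, cj * ci] ++ (if cj - ci ≥ 0 then [cj - ci] else [])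
    ++ (if cj ≠ 0 ∧ ci ≠ 0 then [PySem.Int.floordiv cj ci] else [])

-- the mathematical level sets: values expressible with exactly i copies of the digit
def PC (N : Int) (i : Nat) : List Int :=
  repP N i :: ((List.range' 1 (i - 1)).attach.flatMap (fun jh =>
    (PC N jh.1).flatMap (fun ci => (PC N (i - jh.1)).flatMap (fun cj => ops cj ci))))
termination_by i
decreasing_by
  · have := jh.2; rw [List.mem_range'] at this; omega
  · have := jh.2; rw [List.mem_range'] at this; omega

def mequiv (l1 l2 : List Int) : Prop := ∀ x, x ∈ l1 ↔ x ∈ l2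

-- ghost view of a hash set under construction: element list + index consistency
def RS (s : Array Int × Std.HashSet Int) (l : List Int) : Prop :=
  s.1.toList = l ∧ ∀ x : Int, s.2.contains x = true ↔ x ∈ l

lemma RS_empty : RS ((#[] : Array Int), (∅ : Std.HashSet Int)) [] := by
  constructor
  · rfl
  · intro x; simp

lemma RS_hadd {s : Array Int × Std.HashSet Int} {l : List Int} (h : RS s l) (x : Int) :
    RS (hadd s x) (PySem.Set.add l x) := by
  obtain ⟨h1, h2⟩ := h
  unfold hadd
  rw [PySem.Set.add_eq_ite]
  by_cases hx : x ∈ l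
  · rw [if_pos ((h2 x).mpr hx), if_pos hx]
    exact ⟨h1, h2⟩
  · rw [if_neg (fun hc => hx ((h2 x).mp hc)), if_neg hx]
    refine ⟨by simp [h1], fun t => ?_⟩
    simp only [Std.HashSet.contains_insert, Bool.or_eq_true, beq_iff_eq, h2 t,
      List.mem_append, List.mem_singleton]
    tauto

lemma RS_foldl {σ : Type} (f' : Array Int × Std.HashSet Int → σ → Array Int × Std.HashSet Int)
    (f : List Int → σ → List Int)
    (hstep : ∀ s l b, RS s l → RS (f' s b) (f l b)) :
    ∀ (L : List σ) s l, RS s l → RS (L.foldl f' s) (L.foldl f l) := by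
  intro L
  induction L with
  | nil => intro s l h; exact h
  | cons b L ih => intro s l h; exact ih _ _ (hstep s l b h)

lemma hset_eq (l : List Int) : hset l = PySem.Set.ofList l := by
  unfold hset
  rw [PySem.Set.ofList_eq_foldl]
  exact (RS_foldl hadd PySem.Set.add (fun s l' x h => RS_hadd h x) l _ [] RS_empty).1

-- ghost view of bodyB on plain lists
def bodyG (l : List Int) (x y : Int) : List Int :=
  let v1 := PySem.Set.add l (x + y)
  let v2 := PySem.Set.add v1 (x * y)
  let v3 := if x - y ≥ 0 then PySem.Set.add v2 (x - y) else v2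
  if x ≠ 0 ∧ y ≠ 0 then PySem.Set.add v3 (PySem.Int.floordiv x y) else v3

lemma RS_bodyB {s : Array Int × Std.HashSet Int} {l : List Int} (h : RS s l) (x y : Int) :
    RS (bodyB s x y) (bodyG l x y) := by
  unfold bodyB bodyG
  split_ifs
  · exact RS_hadd (RS_hadd (RS_hadd (RS_hadd h _) _) _) _
  · exact RS_hadd (RS_hadd (RS_hadd h _) _) _
  · exact RS_hadd (RS_hadd (RS_hadd h _) _) _
  · exact RS_hadd (RS_hadd h _) _

lemma mem_bodyG (l : List Int) (x y t : Int) :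
    t ∈ bodyG l x y ↔ t ∈ l ∨ t ∈ ops x y := by
  unfold bodyG ops
  split_ifs <;> simp [PySem.Set.mem_add] <;> tauto

-- A side: Array fold → List fold
lemma toList_bodyA (case : Array Int) (cj ci : Int) :
    (bodyA case cj ci).toList = case.toList ++ ops cj ci := by
  unfold bodyA ops; split_ifs <;> simp

lemma toList_foldl {σ : Type} (f' : Array Int → σ → Array Int) (f : List Int → σ → List Int)
    (h : ∀ a b, (f' a b).toList = f a.toList b) :
    ∀ (L : List σ) (a : Array Int), (L.foldl f' a).toList = L.foldl f a.toList := by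
  intro L
  induction L with
  | nil => intro a; rfl
  | cons b L ih => intro a; rw [List.foldl_cons, List.foldl_cons, ih, h]

-- the list A's case-building fold computes
def caseG (N : Int) (dp : List (List Int)) (i : Int) : List Int :=
  (PySem.List.pyRange 1 i 1).foldl (fun case j =>
    (PySem.List.pyGetD dp j []).foldl (fun case ci =>
      (PySem.List.pyGetD dp (i - j) []).foldl (fun case cj => case ++ ops cj ci) case) case)
    [repP N i.toNat]

lemma toList_caseA (N : Int) (dp : List (List Int)) (i : Int) :
    (caseA N dp i).toList = caseG N dp i := by
  unfold caseA caseG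
  have h1 : ∀ (lij : List Int) (ci : Int) (a : Array Int),
      (lij.foldl (fun c cj => bodyA c cj ci) a).toList
        = lij.foldl (fun c cj => c ++ ops cj ci) a.toList :=
    fun lij ci => toList_foldl _ _ (fun a cj => toList_bodyA a cj ci) lij
  have h2 : ∀ (lj lij : List Int) (a : Array Int),
      (lj.foldl (fun c ci => lij.foldl (fun c cj => bodyA c cj ci) c) a).toList
        = lj.foldl (fun c ci => lij.foldl (fun c cj => c ++ ops cj ci) c) a.toList :=
    fun lj lij => toList_foldl _ _ (fun a ci => h1 lij ci a) lj
  exact toList_foldl _ _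
    (fun a j => h2 (PySem.List.pyGetD dp j []) (PySem.List.pyGetD dp (i - j) []) a) _ _

lemma mem_foldl_step {β : Type} (f : List Int → β → List Int) (g : β → Int → Prop)
    (hf : ∀ acc b t, t ∈ f acc b ↔ t ∈ acc ∨ g b t) :
    ∀ (L : List β) (acc : List Int) (t : Int),
      t ∈ L.foldl f acc ↔ t ∈ acc ∨ ∃ b ∈ L, g b t := by
  intro L
  induction L with
  | nil => simp
  | cons b L ih =>
    intro acc t
    simp only [List.foldl_cons, ih, hf, List.mem_cons]
    constructor
    · rintro ((h | h) | ⟨b', hb', h⟩)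
      exacts [Or.inl h, Or.inr ⟨b, Or.inl rfl, h⟩, Or.inr ⟨b', Or.inr hb', h⟩]
    · rintro (h | ⟨b', (rfl | hb'), h⟩)
      exacts [Or.inl (Or.inl h), Or.inl (Or.inr h), Or.inr ⟨b', hb', h⟩]

lemma mem_PC (N : Int) (i : Nat) (t : Int) :
    t ∈ PC N i ↔ t = repP N i ∨ ∃ j : Nat, 1 ≤ j ∧ j < i ∧
      ∃ ci ∈ PC N j, ∃ cj ∈ PC N (i - j), t ∈ ops cj ci := by
  rw [PC]
  simp only [List.mem_cons, List.mem_flatMap, List.mem_attach, true_and, Subtype.exists,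
    List.mem_range'_1]
  constructor
  · rintro (h | ⟨j, hj, ci, hci, cj, hcj, ht⟩)
    · exact Or.inl h
    · exact Or.inr ⟨j, by omega, by omega, ci, hci, cj, hcj, ht⟩
  · rintro (h | ⟨j, h1, h2, ci, hci, cj, hcj, ht⟩)
    · exact Or.inl h
    · exact Or.inr ⟨j, ⟨h1, by omega⟩, ci, hci, cj, hcj, ht⟩

lemma mem_caseG (N : Int) (dp : List (List Int)) (i t : Int) :
    t ∈ caseG N dp i ↔ t = repP N i.toNat ∨ ∃ j ∈ PySem.List.pyRange 1 i 1,
      ∃ ci ∈ PySem.List.pyGetD dp j [], ∃ cj ∈ PySem.List.pyGetD dp (i - j) [], t ∈ ops cj ci := by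
  have hin : ∀ (lij : List Int) (acc : List Int) (ci t : Int),
      t ∈ lij.foldl (fun c cj => c ++ ops cj ci) acc ↔ t ∈ acc ∨ ∃ cj ∈ lij, t ∈ ops cj ci :=
    fun lij acc ci t =>
      mem_foldl_step _ (fun cj t => t ∈ ops cj ci) (fun acc cj t => by simp) lij acc t
  have hmid : ∀ (lj lij : List Int) (acc : List Int) (t : Int),
      t ∈ lj.foldl (fun c ci => lij.foldl (fun c cj => c ++ ops cj ci) c) acc ↔
        t ∈ acc ∨ ∃ ci ∈ lj, ∃ cj ∈ lij, t ∈ ops cj ci :=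
    fun lj lij acc t =>
      mem_foldl_step _ (fun ci t => ∃ cj ∈ lij, t ∈ ops cj ci)
        (fun acc ci t => hin lij acc ci t) lj acc t
  unfold caseG
  rw [mem_foldl_step _
    (fun j t => ∃ ci ∈ PySem.List.pyGetD dp j [],
        ∃ cj ∈ PySem.List.pyGetD dp (i - j) [], t ∈ ops cj ci)
    (fun acc j t => hmid _ _ acc t)]
  simp

lemma caseA_PC (N : Int) (i : Nat) (dp : List (List Int))
    (hdp : ∀ j : Nat, 1 ≤ j → j < i → mequiv (PySem.List.pyGetD dp (j : Int) []) (PC N j)) :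
    mequiv (caseA N dp (i : Int)).toList (PC N i) := by
  intro t
  rw [toList_caseA, mem_caseG, mem_PC]
  simp only [Int.toNat_natCast]
  constructor
  · rintro (h | ⟨j, hj, ci, hci, cj, hcj, ht⟩)
    · exact Or.inl h
    · rw [PySem.List.mem_pyRange_one] at hj
      obtain ⟨hj1, hj2⟩ := hj
      have hjn : j = ((j.toNat : Nat) : Int) := by omega
      have h1 : 1 ≤ j.toNat := by omega
      have h2 : j.toNat < i := by omega
      have hij : (i : Int) - j = ((i - j.toNat : Nat) : Int) := by omega
      refine Or.inr ⟨j.toNat, h1, h2, ci, ?_, cj, ?_, ht⟩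
      · exact (hdp j.toNat h1 h2 ci).mp (by rwa [hjn] at hci)
      · exact (hdp (i - j.toNat) (by omega) (by omega) cj).mp (by rwa [hij] at hcj)
  · rintro (h | ⟨j, h1, h2, ci, hci, cj, hcj, ht⟩)
    · exact Or.inl h
    · refine Or.inr ⟨(j : Int), ?_, ci, ?_, cj, ?_, ht⟩
      · rw [PySem.List.mem_pyRange_one]
        exact ⟨by exact_mod_cast h1, by exact_mod_cast h2⟩
      · exact (hdp j h1 h2 ci).mpr hci
      · have hij : (i : Int) - (j : Int) = ((i - j : Nat) : Int) := by omega
        rw [hij]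
        exact (hdp (i - j) (by omega) (by omega) cj).mpr hcj

def pureLoop (N : Int) (number : Int) : List Nat → Int
  | [] => -1
  | i :: rest => if number ∈ PC N i then (i : Int) else pureLoop N number rest

lemma contains_iff_toList (arr : Array Int) (x : Int) :
    arr.contains x = true ↔ x ∈ arr.toList := by simp

lemma loopA_pure (N number : Int) : ∀ (m k : Nat) (dp : List (List Int)),
    dp.length = k + 1 →
    (∀ j : Nat, 1 ≤ j → j ≤ k → mequiv (PySem.List.pyGetD dp (j : Int) []) (PC N j)) →
    loopA N number ((List.range' (k + 1) m).map (Nat.cast : Nat → Int)) dp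
      = pureLoop N number (List.range' (k + 1) m) := by
  intro m
  induction m with
  | zero => intro k dp _ _; simp [loopA, pureLoop]
  | succ m ih =>
    intro k dp hlen hdp
    rw [List.range'_succ, List.map_cons]
    simp only [loopA, pureLoop]
    have hc := caseA_PC N (k + 1) dp (fun j h1 h2 => hdp j h1 (by omega))
    have hcond : (caseA N dp ((k + 1 : Nat) : Int)).contains number = true ↔
        number ∈ PC N (k + 1) := by
      rw [contains_iff_toList]; exact hc number
    by_cases hmem : number ∈ PC N (k + 1)
    · rw [if_pos (hcond.mpr hmem), if_pos hmem]
    · rw [if_neg (fun h => hmem (hcond.mp h)), if_neg hmem]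
      apply ih (k + 1)
      · simp [hlen]
      · intro j h1 h2
        by_cases hj : j ≤ k
        · intro x
          rw [← hdp j h1 hj x]
          rw [PySem.List.pyGetD_natCast, PySem.List.pyGetD_natCast]
          have : (dp ++ [hset (caseA N dp ((k + 1 : Nat) : Int)).toList]).getD j []
              = dp.getD j [] := by
            simp [List.getD_eq_getElem?_getD, List.getElem?_append_left
              (show j < dp.length by omega)]
          rw [this]
        · have hjk : j = k + 1 := by omega
          subst hjk
          intro x
          rw [PySem.List.pyGetD_natCast]
          have hsd : (dp ++ [hset (caseA N dp ((k + 1 : Nat) : Int)).toList]).getD (k + 1) []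
              = hset (caseA N dp ((k + 1 : Nat) : Int)).toList := by
            simp [List.getD_eq_getElem?_getD, hlen]
          rw [hsd, hset_eq, PySem.Set.mem_ofList]
          exact hc x

def InvB (N : Int) (memo : PySem.Dict Int (PySem.Set Int)) : Prop :=
  ∀ (t : Nat) v, PySem.Dict.get? memo (t : Int) = some v → mequiv v (PC N t)

lemma reachB_correct (N : Int) : ∀ (fuel i : Nat), 1 ≤ i → i ≤ fuel → ∀ memo, InvB N memo →
    mequiv (reachB N fuel i memo).1 (PC N i) ∧ InvB N (reachB N fuel i memo).2 := by
  intro fuel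
  induction fuel with
  | zero => intro i h1 h2; omega
  | succ fuel IH =>
    intro i hi hif memo hm
    rw [reachB]
    split
    · next v hg => exact ⟨hm i v hg, hm⟩
    · next hg =>
      have hfold : ∀ (js : List Nat)
          (acc : (Array Int × Std.HashSet Int) × PySem.Dict Int (PySem.Set Int)),
          (∀ j ∈ js, 1 ≤ j ∧ j < i) → (∀ x : Int, acc.1.2.contains x = true ↔ x ∈ acc.1.1.toList) →
          InvB N acc.2 →
          (∀ x, x ∈ (js.foldl
              (fun acc j =>
                let l := reachB N fuel (i - j) acc.2
                let rr := reachB N fuel j l.2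
                (l.1.foldl (fun v x => rr.1.foldl (fun v y => bodyB v x y) v) acc.1, rr.2))
              acc).1.1.toList ↔
            x ∈ acc.1.1.toList ∨ ∃ j ∈ js, ∃ a ∈ PC N (i - j), ∃ b ∈ PC N j, x ∈ ops a b) ∧
          (∀ x : Int, (js.foldl
              (fun acc j =>
                let l := reachB N fuel (i - j) acc.2
                let rr := reachB N fuel j l.2
                (l.1.foldl (fun v x => rr.1.foldl (fun v y => bodyB v x y) v) acc.1, rr.2))
              acc).1.2.contains x = true ↔ x ∈ (js.foldl
              (fun acc j =>
                let l := reachB N fuel (i - j) acc.2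
                let rr := reachB N fuel j l.2
                (l.1.foldl (fun v x => rr.1.foldl (fun v y => bodyB v x y) v) acc.1, rr.2))
              acc).1.1.toList) ∧
          InvB N (js.foldl
              (fun acc j =>
                let l := reachB N fuel (i - j) acc.2
                let rr := reachB N fuel j l.2
                (l.1.foldl (fun v x => rr.1.foldl (fun v y => bodyB v x y) v) acc.1, rr.2))
              acc).2 := by
        intro js
        induction js with
        | nil => intro acc _ hs hacc; exact ⟨fun x => by simp, hs, hacc⟩
        | cons j js ihjs =>
          intro acc hjs hs hacc
          obtain ⟨hj1, hj2⟩ := hjs j (by simp)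
          have hr1 := IH (i - j) (by omega) (by omega) acc.2 hacc
          have hr2 := IH j hj1 (by omega) (reachB N fuel (i - j) acc.2).2 hr1.2
          -- the double fold over the two level sets, on the hash-set pair vs its ghost list
          have hRS := RS_foldl
            (fun v x => (reachB N fuel j (reachB N fuel (i - j) acc.2).2).1.foldl
              (fun v y => bodyB v x y) v)
            (fun l x => (reachB N fuel j (reachB N fuel (i - j) acc.2).2).1.foldl
              (fun l y => bodyG l x y) l)
            (fun s l x h => RS_foldl (fun v y => bodyB v x y) (fun l y => bodyG l x y)
              (fun s' l' y h' => RS_bodyB h' x y) _ s l h)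
            (reachB N fuel (i - j) acc.2).1 acc.1 acc.1.1.toList ⟨rfl, hs⟩
          have hmemv : ∀ x : Int,
              x ∈ ((reachB N fuel (i - j) acc.2).1.foldl
                (fun v xx => (reachB N fuel j (reachB N fuel (i - j) acc.2).2).1.foldl
                  (fun v y => bodyB v xx y) v) acc.1).1.toList ↔
              x ∈ acc.1.1.toList ∨ ∃ a ∈ PC N (i - j), ∃ b ∈ PC N j, x ∈ ops a b := by
            intro x
            rw [hRS.1]
            rw [mem_foldl_step _
              (fun xx t => ∃ y ∈ (reachB N fuel j (reachB N fuel (i - j) acc.2).2).1, t ∈ ops xx y)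
              (fun acc' xx t => mem_foldl_step _ (fun y t => t ∈ ops xx y)
                (fun acc'' y t => mem_bodyG acc'' xx y t) _ acc' t)]
            constructor
            · rintro (hx | ⟨a, ha, b, hb, hx⟩)
              · exact Or.inl hx
              · exact Or.inr ⟨a, (hr1.1 a).mp ha, b, (hr2.1 b).mp hb, hx⟩
            · rintro (hx | ⟨a, ha, b, hb, hx⟩)
              · exact Or.inl hx
              · exact Or.inr ⟨a, (hr1.1 a).mpr ha, b, (hr2.1 b).mpr hb, hx⟩
          have hrest := ihjs
            ((reachB N fuel (i - j) acc.2).1.foldl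
                (fun v xx => (reachB N fuel j (reachB N fuel (i - j) acc.2).2).1.foldl
                  (fun v y => bodyB v xx y) v) acc.1,
              (reachB N fuel j (reachB N fuel (i - j) acc.2).2).2)
            (fun j' hj' => hjs j' (by simp [hj']))
            (by intro x; rw [hRS.1]; exact hRS.2 x) hr2.2
          rw [List.foldl_cons]
          refine ⟨fun x => ?_, hrest.2.1, hrest.2.2⟩
          rw [hrest.1 x]
          simp only [hmemv x, List.mem_cons]
          constructor
          · rintro ((hx | ⟨a, ha, b, hb, hx⟩) | ⟨j', hj', a, ha, b, hb, hx⟩)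
            · exact Or.inl hx
            · exact Or.inr ⟨j, Or.inl rfl, a, ha, b, hb, hx⟩
            · exact Or.inr ⟨j', Or.inr hj', a, ha, b, hb, hx⟩
          · rintro (hx | ⟨j', (rfl | hj'), a, ha, b, hb, hx⟩)
            · exact Or.inl (Or.inl hx)
            · exact Or.inl (Or.inr ⟨a, ha, b, hb, hx⟩)
            · exact Or.inr ⟨j', hj', a, ha, b, hb, hx⟩
      have hinit : RS (hadd ((#[] : Array Int), (∅ : Std.HashSet Int)) (repP N i))
          (PySem.Set.add [] (repP N i)) := RS_hadd RS_empty (repP N i)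
      have hjl := hfold (List.range' 1 (i - 1))
        (hadd ((#[] : Array Int), (∅ : Std.HashSet Int)) (repP N i), memo)
        (fun j hj => by rw [List.mem_range'_1] at hj; omega)
        (by intro x; rw [hinit.1]; exact hinit.2 x) hm
      have hmeq : mequiv ((List.range' 1 (i - 1)).foldl
          (fun acc j =>
            let l := reachB N fuel (i - j) acc.2
            let rr := reachB N fuel j l.2
            (l.1.foldl (fun v x => rr.1.foldl (fun v y => bodyB v x y) v) acc.1, rr.2))
          (hadd ((#[] : Array Int), (∅ : Std.HashSet Int)) (repP N i), memo)).1.1.toList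
          (PC N i) := by
        intro x
        rw [hjl.1 x, hinit.1, mem_PC]
        simp only [PySem.Set.add, List.mem_range'_1]
        constructor
        · rintro (hx | ⟨j', hj', a, ha, b, hb, hx⟩)
          · exact Or.inl (by simpa using hx)
          · exact Or.inr ⟨j', by omega, by omega, b, hb, a, ha, hx⟩
        · rintro (hx | ⟨j', h1, h2, b, hb, a, ha, hx⟩)
          · exact Or.inl (by simpa using hx)
          · exact Or.inr ⟨j', by omega, a, ha, b, hb, hx⟩
      refine ⟨hmeq, ?_⟩
      intro t v hget
      rw [PySem.Dict.get?_insert] at hget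
      by_cases ht : (t : Int) = (i : Int)
      · rw [if_pos ht] at hget
        have hti : t = i := by exact_mod_cast ht
        subst hti
        injection hget with hv
        intro x
        rw [← hv]
        exact hmeq x
      · rw [if_neg ht] at hget
        exact hjl.2.2 t v hget

lemma mainB_pure (N number : Int) : ∀ (ks : List Nat) memo, (∀ t ∈ ks, 1 ≤ t) → InvB N memo →
    mainB N number ks memo = pureLoop N number ks := by
  intro ks
  induction ks with
  | nil => intro memo _ _; rfl
  | cons i rest ih =>
    intro memo hks hm
    have hr := reachB_correct N i i (hks i (by simp)) (le_refl i) memo hm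
    simp only [mainB, pureLoop]
    by_cases hmem : number ∈ PC N i
    · rw [if_pos ((hr.1 number).mpr hmem), if_pos hmem]
    · rw [if_neg (fun hx => hmem ((hr.1 number).mp hx)), if_neg hmem]
      exact ih _ (fun t htm => hks t (by simp [htm])) hr.2

-- ===== VERDICT (by name: the statement is the Claim_ definition above) =====
theorem solution_spec : Claim_equal_solution := by
  unfold Claim_equal_solution
  intro N number _ _
  unfold Spec_solution solution solution_alt
  have hA : PySem.List.pyRange 1 9 1 = (List.range' 1 8).map (Nat.cast : Nat → Int) := by decide
  rw [hA, loopA_pure N number 8 0 [[]] (by simp) (fun j h1 h2 => by omega),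
    mainB_pure N number [1, 2, 3, 4, 5, 6, 7, 8] PySem.Dict.empty (by decide)
      (fun t v h => by simp [PySem.Dict.get?_empty] at h)]
  norm_num [List.range']
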